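-- pv_equiv track=rewrite | github.com/mozartdiniz/Tunnel | linux/build-aux/flatpak-cargo-generator.py | _parse_lockfile
-- ===== SOURCE A (Python) =====
-- def _parse_lockfile(text: str) -> list[dict[str, str]]:
--     """Parse Cargo.lock into a list of [[package]] dicts.
--
--     Handles both v2 (plain) and v3 (checksum-in-entry) formats.
--     Skips workspace-path dependencies (no source or checksum).
--     """
--     packages: list[dict[str, str]] = []
--     current: dict[str, str] = {}
--
--     for raw_line in text.splitlines():
--         line = raw_line.strip()
--         if line == "[[package]]":
--             if current:
--                 packages.append(current)
--             current = {}
--         elif line.startswith("#") or not line: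
--             continue
--         elif "=" in line:
--             key, _, val = line.partition("=")
--             key = key.strip()
--             val = val.strip()
--             # Strip surrounding double-quotes (all Cargo.lock string values are quoted)
--             if val.startswith('"') and val.endswith('"'):
--                 val = val[1:-1]
--             current[key] = val
--
--     if current:
--         packages.append(current)
--
--     return packages
-- ===== SOURCE B (Python) =====
-- def _parse_block(lines):
--     """Parse one block's lines (comments/blanks skipped, key = "val" pairs) into a dict."""
--     d = {}
--     for raw_line in lines:
--         line = raw_line.strip()
--         if line.startswith("#") or not line:
--             continue
--         if "=" in line:
--             key, _, val = line.partition("=")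
--             key = key.strip()
--             val = val.strip()
--             if val.startswith('"') and val.endswith('"'):
--                 val = val[1:-1]
--             d[key] = val
--     return d
--
-- def _parse_lockfile(text):
--     # Phase 1: split the lines into segments, cutting at every '[[package]]' marker
--     # (the leading segment keeps any header lines before the first marker).
--     segments = []
--     seg = []
--     for raw_line in text.splitlines():
--         if raw_line.strip() == "[[package]]":
--             segments.append(seg)
--             seg = []
--         else:
--             seg.append(raw_line)
--     segments.append(seg)
--     # Phase 2: parse each segment independently, keeping only non-empty dicts.
--     return [d for d in map(_parse_block, segments) if d]
-- ===== Notes on version B (the rewrite author's own statement) =====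
-- stated objective: alternative
-- what changed: A's single pass with a mutable (packages, current) accumulator is replaced by a two-phase pipeline: first split the lines into segments at every package marker line (keeping the leading header segment), then parse each segment independently with a _parse_block helper and keep the non-empty dicts.
import Mathlib
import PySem

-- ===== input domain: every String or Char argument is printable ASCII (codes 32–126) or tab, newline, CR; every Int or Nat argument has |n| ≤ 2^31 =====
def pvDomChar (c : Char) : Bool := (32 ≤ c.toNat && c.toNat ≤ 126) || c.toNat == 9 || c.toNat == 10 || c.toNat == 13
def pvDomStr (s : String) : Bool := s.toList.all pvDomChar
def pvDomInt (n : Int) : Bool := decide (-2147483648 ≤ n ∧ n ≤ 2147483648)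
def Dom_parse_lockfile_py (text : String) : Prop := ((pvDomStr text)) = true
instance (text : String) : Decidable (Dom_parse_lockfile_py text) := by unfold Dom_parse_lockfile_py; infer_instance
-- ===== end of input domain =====

-- B re-implements A's single mutable-accumulator loop as a two-phase pipeline:
-- split the lines into segments at '[[package]]' markers, then parse each segment
-- independently and keep the non-empty dicts (alternative decomposition, same cost).

-- ===== PORT A =====
-- A's loop step: state = (packages so far, current dict)
def pvStepA (st : List (PySem.Dict String String) × PySem.Dict String String)
    (raw_line : String) : List (PySem.Dict String String) × PySem.Dict String String :=
  let line := PySem.Str.strip raw_line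
  if line = "[[package]]" then
    ((if st.2.items ≠ [] then st.1 ++ [st.2] else st.1), PySem.Dict.empty)
  else if PySem.Str.startswith line "#" || line = "" then st
  else if PySem.Str.isIn "=" line then
    -- key, _, val = line.partition("="): split at the first '='
    let i := PySem.Str.find line "="
    let key := PySem.Str.strip (PySem.Str.slice line none (some i))
    let v0 := PySem.Str.strip (PySem.Str.slice line (some (i + 1)) none)
    let v := if PySem.Str.startswith v0 "\"" && PySem.Str.endswith v0 "\"" then
        PySem.Str.slice v0 (some 1) (some (-1)) else v0
    (st.1, st.2.insert key v)
  else st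

def parse_lockfile_py (text : String) : List (List (String × String)) :=
  let r := (PySem.Str.splitlines text).foldl pvStepA ([], PySem.Dict.empty)
  (if r.2.items ≠ [] then r.1 ++ [r.2] else r.1).map (·.items)

-- ===== PORT B =====
-- per-line step of B's _parse_block
def pvLineStep (d : PySem.Dict String String) (raw_line : String) : PySem.Dict String String :=
  let line := PySem.Str.strip raw_line
  if PySem.Str.startswith line "#" || line = "" then d
  else if PySem.Str.isIn "=" line then
    let i := PySem.Str.find line "="
    let key := PySem.Str.strip (PySem.Str.slice line none (some i))
    let v0 := PySem.Str.strip (PySem.Str.slice line (some (i + 1)) none)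
    let v := if PySem.Str.startswith v0 "\"" && PySem.Str.endswith v0 "\"" then
        PySem.Str.slice v0 (some 1) (some (-1)) else v0
    d.insert key v
  else d

def pvParseBlock (lines : List String) : PySem.Dict String String :=
  lines.foldl pvLineStep PySem.Dict.empty

-- Phase 1: split lines into segments at '[[package]]' markers
def pvSplitBlocks (lines : List String) : List (List String) :=
  let st := lines.foldl
    (fun (st : List (List String) × List String) raw_line =>
      if PySem.Str.strip raw_line = "[[package]]" then (st.1 ++ [st.2], [])
      else (st.1, st.2 ++ [raw_line]))
    ([], [])
  st.1 ++ [st.2]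

def parse_lockfile_py_alt (text : String) : List (List (String × String)) :=
  ((((pvSplitBlocks (PySem.Str.splitlines text)).map pvParseBlock).filter
      (fun d => d.items ≠ [])).map (·.items))

-- ===== PRECONDITION & SPEC =====
def Spec_parse_lockfile_py (text : String) (out : List (List (String × String))) : Prop := out = parse_lockfile_py_alt text
instance (text : String) (out : List (List (String × String))) : Decidable (Spec_parse_lockfile_py text out) := by unfold Spec_parse_lockfile_py; infer_instance

-- ===== CLAIM (what is proved, stated in full; the proofs are below) =====
def Claim_equal_parse_lockfile_py : Prop := ∀ (text : String), Dom_parse_lockfile_py text → Spec_parse_lockfile_py text (parse_lockfile_py text)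

-- ===== LEMMAS AND PROOFS =====

-- the sequence of dicts produced when parsing `lines` starting from current dict `cur`
def pvBlocksFrom (cur : PySem.Dict String String) : List String → List (PySem.Dict String String)
  | [] => [cur]
  | raw :: rest =>
    if PySem.Str.strip raw = "[[package]]" then cur :: pvBlocksFrom PySem.Dict.empty rest
    else pvBlocksFrom (pvLineStep cur raw) rest

theorem pvStepA_eq (st : List (PySem.Dict String String) × PySem.Dict String String)
    (raw : String) :
    pvStepA st raw =
      if PySem.Str.strip raw = "[[package]]" then
        ((if st.2.items ≠ [] then st.1 ++ [st.2] else st.1), PySem.Dict.empty)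
      else (st.1, pvLineStep st.2 raw) := by
  simp only [pvStepA, pvLineStep]
  split_ifs <;> rfl

theorem pvFoldA_eq (lines : List String)
    (pkgs : List (PySem.Dict String String)) (cur : PySem.Dict String String) :
    (if (lines.foldl pvStepA (pkgs, cur)).2.items ≠ []
     then (lines.foldl pvStepA (pkgs, cur)).1 ++ [(lines.foldl pvStepA (pkgs, cur)).2]
     else (lines.foldl pvStepA (pkgs, cur)).1) =
    pkgs ++ (pvBlocksFrom cur lines).filter (fun d => d.items ≠ []) := by
  induction lines generalizing pkgs cur with
  | nil =>
    simp only [List.foldl_nil, pvBlocksFrom, List.filter]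
    split_ifs with h
    · simp [h]
    · simp at h; simp [h]
  | cons raw rest ih =>
    simp only [List.foldl_cons, pvBlocksFrom, pvStepA_eq]
    by_cases hm : PySem.Str.strip raw = "[[package]]"
    · simp only [hm, if_pos]
      rw [ih]
      by_cases hc : cur.items ≠ []
      · simp [List.filter, hc, List.append_assoc]
      · simp at hc; simp [List.filter, hc]
    · simp only [hm, if_false]
      rw [ih]

theorem pvFoldB_eq (lines : List String)
    (segs0 : List (List String)) (seg0 : List String) :
    ((lines.foldl
        (fun (st : List (List String) × List String) raw_line =>
          if PySem.Str.strip raw_line = "[[package]]" then (st.1 ++ [st.2], [])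
          else (st.1, st.2 ++ [raw_line]))
        (segs0, seg0)).1 ++
      [(lines.foldl
        (fun (st : List (List String) × List String) raw_line =>
          if PySem.Str.strip raw_line = "[[package]]" then (st.1 ++ [st.2], [])
          else (st.1, st.2 ++ [raw_line]))
        (segs0, seg0)).2]).map pvParseBlock =
    segs0.map pvParseBlock ++ pvBlocksFrom (pvParseBlock seg0) lines := by
  induction lines generalizing segs0 seg0 with
  | nil => simp [pvBlocksFrom]
  | cons raw rest ih =>
    simp only [List.foldl_cons, pvBlocksFrom]
    by_cases hm : PySem.Str.strip raw = "[[package]]"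
    · simp only [hm, if_true]
      rw [ih]
      simp [pvParseBlock, List.append_assoc]
    · simp only [hm, if_false]
      rw [ih]
      have : pvParseBlock (seg0 ++ [raw]) = pvLineStep (pvParseBlock seg0) raw := by
        simp [pvParseBlock]
      rw [this]

-- ===== VERDICT (by name: the statement is the Claim_ definition above) =====
theorem parse_lockfile_py_spec : Claim_equal_parse_lockfile_py := by
  intro text _
  unfold Spec_parse_lockfile_py
  simp only [parse_lockfile_py, parse_lockfile_py_alt, pvSplitBlocks]
  rw [pvFoldA_eq, pvFoldB_eq]
  simp [pvParseBlock]
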